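-- pv_equiv track=rewrite | github.com/WaterLoran/Loran | core/logic/response_data.py | get_unify_compare_symbol
-- ===== SOURCE A (Python) =====
-- def get_unify_compare_symbol(symbol):
--     compare_dict = {
--         "equal": ["==", "eq", "equal"],
--         "not_equal": ["!=", "not_equal", "not_eq"],
--         "greater": [">", "lg", "larger", "greater"],
--         "less": ["<", "smaller", "less"],
--         "greater_equal": [">=", "greater_equal"],
--         "less_equal": ["<=", "less_equal"],
--         "in": ["in"],
--         "not_in": ["not_in"],
--         "include": ["include"],
--         "not_include": ["not_include"],
--     }
--     for key, value in compare_dict.items():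
--         if symbol in value:
--             return key
--     raise  # TODO 都没有在里面, 需要抛出异常和定位信息
-- ===== SOURCE B (Python) =====
-- def get_unify_compare_symbol(symbol):
--     # Rule-based normalizer: no alias table at all.
--     # 1) canonical names map to themselves
--     if symbol in ("equal", "not_equal", "greater", "less", "greater_equal",
--                   "less_equal", "in", "not_in", "include", "not_include"):
--         return symbol
--     # 2) word abbreviations, normalized by suffix rules
--     if symbol in ("eq", "not_eq"):
--         return symbol + "ual"
--     if symbol in ("lg", "larger"):
--         return "greater"
--     if symbol == "smaller":
--         return "less"
--     # 3) operator tokens, decoded character by character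
--     head, tail = symbol[:1], symbol[1:]
--     if head == "=" and tail == "=":
--         return "equal"
--     if head == "!" and tail == "=":
--         return "not_equal"
--     if head == ">":
--         base = "greater"
--     elif head == "<":
--         base = "less"
--     else:
--         raise ValueError("unknown comparison symbol: %r" % (symbol,))
--     if tail == "":
--         return base
--     if tail == "=":
--         return base + "_equal"
--     raise ValueError("unknown comparison symbol: %r" % (symbol,))
-- ===== Notes on version B (the rewrite author's own statement) =====
-- stated objective: alternative
-- what changed: B drops the alias table entirely and normalizes the symbol by rules: canonical names pass through, word abbreviations are rewritten by suffix rules (eq->+ual, lg/larger->greater, smaller->less), and operator tokens (<, >, ==, !=, <=, >=) are decoded character by character into base name plus optional _equal suffix.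
import Mathlib
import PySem

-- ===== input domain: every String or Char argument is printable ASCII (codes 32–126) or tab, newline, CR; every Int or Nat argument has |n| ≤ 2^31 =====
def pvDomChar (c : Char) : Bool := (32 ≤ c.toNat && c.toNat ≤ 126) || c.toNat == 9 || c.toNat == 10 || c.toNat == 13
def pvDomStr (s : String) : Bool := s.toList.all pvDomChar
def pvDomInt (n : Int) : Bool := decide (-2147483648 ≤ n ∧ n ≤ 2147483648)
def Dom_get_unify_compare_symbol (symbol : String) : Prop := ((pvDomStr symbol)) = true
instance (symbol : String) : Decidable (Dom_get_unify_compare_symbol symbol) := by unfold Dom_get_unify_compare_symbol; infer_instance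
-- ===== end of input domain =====

-- B replaces A's alias-table scan by a rule-based normalizer (pass-through / suffix rewrite /
-- character decoding of operator tokens); objective: alternative. Both raise on unknown symbols
-- (A a bare-raise RuntimeError, B a ValueError); Pre_ admits exactly the known aliases.


-- ===== PORT A =====
-- the dict literal, in insertion order
def pvCompareDict : List (String × List String) :=
  [("equal", ["==", "eq", "equal"]),
   ("not_equal", ["!=", "not_equal", "not_eq"]),
   ("greater", [">", "lg", "larger", "greater"]),
   ("less", ["<", "smaller", "less"]),
   ("greater_equal", [">=", "greater_equal"]),
   ("less_equal", ["<=", "less_equal"]),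
   ("in", ["in"]),
   ("not_in", ["not_in"]),
   ("include", ["include"]),
   ("not_include", ["not_include"])]

-- the for-loop with early return; the final bare `raise` (excluded by Pre_) is rendered as ""
def pvScanA (symbol : String) : List (String × List String) → Option String
  | [] => none
  | (key, value) :: rest => if symbol ∈ value then some key else pvScanA symbol rest

def get_unify_compare_symbol (symbol : String) : String :=
  (pvScanA symbol pvCompareDict).getD ""

-- ===== PORT B =====
-- rule-based normalizer, step for step from Source B; the two `raise ValueError` paths
-- (excluded by Pre_) are rendered as "". symbol[:1]/symbol[1:] are exact via take/drop
-- on the character list (nonnegative slice bounds).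
def get_unify_compare_symbol_alt (symbol : String) : String :=
  if symbol ∈ ["equal", "not_equal", "greater", "less", "greater_equal",
               "less_equal", "in", "not_in", "include", "not_include"] then symbol
  else if symbol ∈ ["eq", "not_eq"] then symbol ++ "ual"
  else if symbol ∈ ["lg", "larger"] then "greater"
  else if symbol = "smaller" then "less"
  else
    let head := String.mk (symbol.toList.take 1)
    let tail := String.mk (symbol.toList.drop 1)
    if head = "=" ∧ tail = "=" then "equal"
    else if head = "!" ∧ tail = "=" then "not_equal"
    else if head = ">" then
      if tail = "" then "greater" else if tail = "=" then "greater" ++ "_equal" else ""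
    else if head = "<" then
      if tail = "" then "less" else if tail = "=" then "less" ++ "_equal" else ""
    else ""

-- ===== PRECONDITION & SPEC =====
-- Pre_ excludes exactly the symbols not in any alias list, on which A raises
-- (bare raise → RuntimeError) and B raises ValueError.
def Pre_get_unify_compare_symbol (symbol : String) : Prop :=
  symbol ∈ ["==", "eq", "equal", "!=", "not_equal", "not_eq", ">", "lg", "larger", "greater",
            "<", "smaller", "less", ">=", "greater_equal", "<=", "less_equal", "in", "not_in",
            "include", "not_include"]
instance (symbol : String) : Decidable (Pre_get_unify_compare_symbol symbol) := by
  unfold Pre_get_unify_compare_symbol; infer_instance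

def pvWitness_get_unify_compare_symbol : String := "=="

def Spec_get_unify_compare_symbol (symbol : String) (out : String) : Prop := out = get_unify_compare_symbol_alt symbol
instance (symbol : String) (out : String) : Decidable (Spec_get_unify_compare_symbol symbol out) := by unfold Spec_get_unify_compare_symbol; infer_instance

-- ===== CLAIM (what is proved, stated in full; the proofs are below) =====
def Claim_equal_get_unify_compare_symbol : Prop := ∀ (symbol : String), Dom_get_unify_compare_symbol symbol → Pre_get_unify_compare_symbol symbol → Spec_get_unify_compare_symbol symbol (get_unify_compare_symbol symbol)

-- ===== LEMMAS AND PROOFS =====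

-- ===== VERDICT (by name: the statement is the Claim_ definition above) =====
theorem get_unify_compare_symbol_spec : Claim_equal_get_unify_compare_symbol := by
  intro symbol _ hpre
  unfold Pre_get_unify_compare_symbol at hpre
  unfold Spec_get_unify_compare_symbol
  simp only [List.mem_cons, List.not_mem_nil, or_false] at hpre
  rcases hpre with h|h|h|h|h|h|h|h|h|h|h|h|h|h|h|h|h|h|h|h|h <;> subst h <;> decide
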